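-- pv_equiv track=rewrite | github.com/Wollac/advent-of-code | aoc/2021/day23.py | hash_key
-- ===== SOURCE A (Python) =====
-- def hash_key(top, rooms) -> int:
--     k = 0
--     for a in top:
--         k = k * 5 + (4 if a is None else a)
--     for room in rooms:
--         for a in room:
--             k = k * 5 + (4 if a is None else a)
--     return k
-- ===== SOURCE B (Python) =====
-- def hash_key(top, rooms) -> int:
--     digits = [4 if a is None else a for a in top]
--     for room in rooms:
--         digits.extend(4 if a is None else a for a in room)
--
--     def value(ds):
--         # returns (base-5 value of ds, 5 ** len(ds)), by divide and conquer:
--         # left half is shifted by the right half's weight and the halves are added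
--         if not ds:
--             return (0, 1)
--         if len(ds) == 1:
--             return (ds[0], 5)
--         mid = len(ds) // 2
--         v1, p1 = value(ds[:mid])
--         v2, p2 = value(ds[mid:])
--         return (v1 * p2 + v2, p1 * p2)
--
--     return value(digits)[0]
-- ===== Notes on version B (the rewrite author's own statement) =====
-- stated objective: alternative
-- what changed: B flattens top and the rooms into one digit list and evaluates it by divide and conquer: each half is valued recursively together with its weight 5**len, and the halves are combined as left*5**len(right)+right, instead of A's left-to-right Horner accumulator over nested loops.
import Mathlib
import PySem

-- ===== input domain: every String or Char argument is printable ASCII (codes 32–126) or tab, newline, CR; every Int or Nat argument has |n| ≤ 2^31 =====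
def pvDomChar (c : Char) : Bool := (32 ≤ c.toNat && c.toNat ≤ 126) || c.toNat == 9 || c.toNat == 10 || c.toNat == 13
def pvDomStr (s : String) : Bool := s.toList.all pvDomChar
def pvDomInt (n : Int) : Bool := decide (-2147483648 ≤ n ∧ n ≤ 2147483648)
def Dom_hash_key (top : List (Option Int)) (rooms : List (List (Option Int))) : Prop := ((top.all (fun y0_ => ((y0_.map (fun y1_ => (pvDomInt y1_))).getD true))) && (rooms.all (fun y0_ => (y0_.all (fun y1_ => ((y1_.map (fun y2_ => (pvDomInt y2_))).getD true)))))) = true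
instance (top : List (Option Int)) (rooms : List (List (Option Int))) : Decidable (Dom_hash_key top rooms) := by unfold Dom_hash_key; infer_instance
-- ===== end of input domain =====

-- B flattens everything into one digit list and evaluates it by divide and conquer
-- (value of left half shifted by the right half's weight), instead of A's
-- left-to-right Horner accumulator over nested loops (alternative decomposition).

-- ===== PORT A =====
def hash_key (top : List (Option Int)) (rooms : List (List (Option Int))) : Int :=
  let k := top.foldl (fun k a => k * 5 + (match a with | none => 4 | some x => x)) 0
  rooms.foldl (fun k room =>
    room.foldl (fun k a => k * 5 + (match a with | none => 4 | some x => x)) k) k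

-- ===== PORT B =====
def pvDigit (a : Option Int) : Int := match a with | none => 4 | some x => x

-- returns (base-5 value of ds, 5 ^ len ds), as in Source B's helper `value`
def pvVal (ds : List Int) : Int × Int :=
  if _h0 : ds = [] then (0, 1)
  else if _h1 : ds.length = 1 then (ds.headI, 5)
  else
    let mid := ds.length / 2
    let r1 := pvVal (ds.take mid)
    let r2 := pvVal (ds.drop mid)
    (r1.1 * r2.2 + r2.1, r1.2 * r2.2)
termination_by ds.length
decreasing_by
  all_goals
    have hne : ds.length ≠ 0 := by simpa using _h0
    simp only [List.length_take, List.length_drop]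
    omega

def hash_key_alt (top : List (Option Int)) (rooms : List (List (Option Int))) : Int :=
  (pvVal (top.map pvDigit ++ rooms.flatMap (fun room => room.map pvDigit))).1

-- ===== PRECONDITION & SPEC =====
def Spec_hash_key (top : List (Option Int)) (rooms : List (List (Option Int))) (out : Int) : Prop := out = hash_key_alt top rooms
instance (top : List (Option Int)) (rooms : List (List (Option Int))) (out : Int) : Decidable (Spec_hash_key top rooms out) := by unfold Spec_hash_key; infer_instance

-- ===== CLAIM (what is proved, stated in full; the proofs are below) =====
def Claim_equal_hash_key : Prop := ∀ (top : List (Option Int)) (rooms : List (List (Option Int))), Dom_hash_key top rooms → Spec_hash_key top rooms (hash_key top rooms)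

-- ===== LEMMAS AND PROOFS =====

-- Horner foldl from an arbitrary start value.
theorem pv_horner_init (b : List Int) : ∀ (k : Int),
    b.foldl (fun k d => k * 5 + d) k
      = k * 5 ^ b.length + b.foldl (fun k d => k * 5 + d) 0 := by
  induction b with
  | nil => intro k; simp
  | cons d b ih =>
    intro k
    simp only [List.foldl_cons, List.length_cons]
    rw [ih (k * 5 + d), ih (0 * 5 + d)]
    ring

-- B's divide-and-conquer helper computes (Horner value, 5 ^ length).
theorem pv_val_eq_aux : ∀ (n : Nat) (ds : List Int), ds.length = n →
    pvVal ds = (ds.foldl (fun k d => k * 5 + d) 0, 5 ^ ds.length) := by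
  intro n
  induction n using Nat.strong_induction_on with
  | _ n ih =>
    intro ds hn
    rw [pvVal]
    by_cases h0 : ds = []
    · subst h0; simp
    · rw [dif_neg h0]
      by_cases h1 : ds.length = 1
      · rw [dif_pos h1]
        cases ds with
        | nil => simp_all
        | cons a t =>
          have : t = [] := by simpa using h1
          subst this; simp
      · rw [dif_neg h1]
        have hne : ds.length ≠ 0 := by simpa using h0
        have hlt1 : (ds.take (ds.length / 2)).length < n := by
          simp only [List.length_take]; omega
        have hlt2 : (ds.drop (ds.length / 2)).length < n := by
          simp only [List.length_drop]; omega
        show ((pvVal (ds.take (ds.length / 2))).1 * (pvVal (ds.drop (ds.length / 2))).2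
                + (pvVal (ds.drop (ds.length / 2))).1,
              (pvVal (ds.take (ds.length / 2))).2 * (pvVal (ds.drop (ds.length / 2))).2)
            = (ds.foldl (fun k d => k * 5 + d) 0, 5 ^ ds.length)
        rw [ih _ hlt1 _ rfl, ih _ hlt2 _ rfl]
        have hsplit : ds = ds.take (ds.length / 2) ++ ds.drop (ds.length / 2) :=
          (List.take_append_drop _ ds).symm
        rw [Prod.mk.injEq]
        constructor
        · conv_rhs => rw [hsplit, List.foldl_append, pv_horner_init]
        · conv_rhs => rw [hsplit]
          rw [List.length_append, pow_add]

theorem pv_val_eq (ds : List Int) :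
    pvVal ds = (ds.foldl (fun k d => k * 5 + d) 0, 5 ^ ds.length) :=
  pv_val_eq_aux ds.length ds rfl

-- A's nested loops over rooms = one Horner foldl over the flattened digits.
theorem pv_flatten (rooms : List (List (Option Int))) : ∀ (k : Int),
    rooms.foldl (fun k room =>
        room.foldl (fun k a => k * 5 + (match a with | none => 4 | some x => x)) k) k
      = (rooms.flatMap (fun room => room.map pvDigit)).foldl (fun k d => k * 5 + d) k := by
  induction rooms with
  | nil => intro k; simp
  | cons room rooms ih =>
    intro k
    simp only [List.foldl, List.flatMap_cons, List.foldl_append, ih, List.foldl_map]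
    rfl

-- ===== VERDICT (by name: the statement is the Claim_ definition above) =====
theorem hash_key_spec : Claim_equal_hash_key := by
  intro top rooms _
  show hash_key top rooms = hash_key_alt top rooms
  unfold hash_key hash_key_alt
  rw [pv_flatten, pv_val_eq]
  have htop : top.foldl (fun k a => k * 5 + (match a with | none => 4 | some x => x)) 0
      = (top.map pvDigit).foldl (fun k d => k * 5 + d) 0 := by
    rw [List.foldl_map]; rfl
  rw [htop, ← List.foldl_append]
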